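-- pv_equiv track=rewrite | github.com/patseng/Commits | weekly_performance_analyzer.py | generate_day_breakdown
-- ===== SOURCE A (Python) =====
-- from typing import Dict, List, Any, Optional, Tuple
--
-- def generate_day_breakdown(author_stats: Dict[str, Any]) -> Dict[str, Dict[str, int]]:
--     """
--     Generate a breakdown by day of week for a specific author
--
--     Args:
--         author_stats: Statistics for a specific author
--
--     Returns:
--         Day-of-week breakdown
--     """
--     day_totals = {
--         'Monday': {'commits': 0, 'additions': 0, 'deletions': 0},
--         'Tuesday': {'commits': 0, 'additions': 0, 'deletions': 0},
--         'Wednesday': {'commits': 0, 'additions': 0, 'deletions': 0},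
--         'Thursday': {'commits': 0, 'additions': 0, 'deletions': 0},
--         'Friday': {'commits': 0, 'additions': 0, 'deletions': 0},
--         'Saturday': {'commits': 0, 'additions': 0, 'deletions': 0},
--         'Sunday': {'commits': 0, 'additions': 0, 'deletions': 0}
--     }
--
--     for day, metrics in author_stats.items():
--         if day in day_totals:
--             day_totals[day] = metrics
--
--     return day_totals
-- ===== SOURCE B (Python) =====
-- _DAYS = ['Monday', 'Tuesday', 'Wednesday', 'Thursday', 'Friday', 'Saturday', 'Sunday']
--
-- def generate_day_breakdown(author_stats):
--     return {day: author_stats[day] if day in author_stats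
--             else {'commits': 0, 'additions': 0, 'deletions': 0}
--             for day in _DAYS}
-- ===== Notes on version B (the rewrite author's own statement) =====
-- stated objective: simpler
-- what changed: B builds the result in one comprehension driven by the fixed Monday-to-Sunday day list, looking each day up in the input (with a fresh zero-default when absent), instead of A's seed-a-7-entry-dict-then-patch-it loop over the input entries.
import Mathlib
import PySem

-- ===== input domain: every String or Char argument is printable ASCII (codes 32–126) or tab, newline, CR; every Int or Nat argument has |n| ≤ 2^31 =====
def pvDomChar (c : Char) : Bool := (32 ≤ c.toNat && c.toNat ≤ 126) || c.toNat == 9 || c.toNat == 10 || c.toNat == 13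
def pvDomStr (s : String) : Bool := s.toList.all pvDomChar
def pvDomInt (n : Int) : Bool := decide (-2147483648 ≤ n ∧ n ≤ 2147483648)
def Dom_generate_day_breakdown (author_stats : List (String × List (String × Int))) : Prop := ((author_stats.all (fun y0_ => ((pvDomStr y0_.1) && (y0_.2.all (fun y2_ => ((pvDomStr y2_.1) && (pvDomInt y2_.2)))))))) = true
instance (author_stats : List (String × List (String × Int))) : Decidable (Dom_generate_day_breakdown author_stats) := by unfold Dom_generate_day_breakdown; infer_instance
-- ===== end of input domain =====

-- B replaces A's seed-then-patch loop over the input by one pass over the fixed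
-- weekday list with a dict lookup (objective: simpler).

-- {'commits': 0, 'additions': 0, 'deletions': 0}
def pvZero : List (String × Int) := [("commits", 0), ("additions", 0), ("deletions", 0)]

-- ===== PORT A =====
def generate_day_breakdown (author_stats : List (String × List (String × Int))) : List (String × List (String × Int)) :=
  let day_totals : PySem.Dict String (List (String × Int)) :=
    PySem.Dict.ofList [("Monday", pvZero), ("Tuesday", pvZero), ("Wednesday", pvZero),
      ("Thursday", pvZero), ("Friday", pvZero), ("Saturday", pvZero), ("Sunday", pvZero)]
  (author_stats.foldl
    (fun d p => if d.contains p.1 then d.insert p.1 p.2 else d) day_totals).items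

-- ===== PORT B =====
def pvDays : List String :=
  ["Monday", "Tuesday", "Wednesday", "Thursday", "Friday", "Saturday", "Sunday"]

def generate_day_breakdown_alt (author_stats : List (String × List (String × Int))) : List (String × List (String × Int)) :=
  pvDays.map (fun day =>
    (day, match (PySem.Dict.mk author_stats).get? day with
          | some v => v
          | none => pvZero))

-- ===== PRECONDITION & SPEC =====
-- Pre_ excludes association lists with duplicate keys: they do not represent any Python
-- dict (A's argument type), and on them A's overwrite loop keeps the last occurrence of a
-- day while B's lookup takes the first — both orders are accidental representations.
def Pre_generate_day_breakdown (author_stats : List (String × List (String × Int))) : Prop :=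
  (author_stats.map Prod.fst).Nodup
instance (author_stats : List (String × List (String × Int))) : Decidable (Pre_generate_day_breakdown author_stats) := by unfold Pre_generate_day_breakdown; infer_instance

def pvWitness_generate_day_breakdown : (List (String × List (String × Int))) :=
  [("Tuesday", [("commits", 3), ("additions", 10), ("deletions", 2)]), ("Funday", [])]

def Spec_generate_day_breakdown (author_stats : List (String × List (String × Int))) (out : List (String × List (String × Int))) : Prop := out = generate_day_breakdown_alt author_stats
instance (author_stats : List (String × List (String × Int))) (out : List (String × List (String × Int))) : Decidable (Spec_generate_day_breakdown author_stats out) := by unfold Spec_generate_day_breakdown; infer_instance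

-- ===== CLAIM (what is proved, stated in full; the proofs are below) =====
def Claim_equal_generate_day_breakdown : Prop := ∀ (author_stats : List (String × List (String × Int))), Dom_generate_day_breakdown author_stats → Pre_generate_day_breakdown author_stats → Spec_generate_day_breakdown author_stats (generate_day_breakdown author_stats)

-- ===== LEMMAS AND PROOFS =====

-- pointwise update of a table function, and the table after a whole list of updates
def pvUpd {V : Type} (g : String → V) (k : String) (v : V) : String → V :=
  fun y => if y = k then v else g y

def pvLast {V : Type} (l : List (String × V)) (g : String → V) : String → V :=
  l.foldl (fun g p => pvUpd g p.1 p.2) g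

theorem pvLast_congr {V : Type} (l : List (String × V)) (g g' : String → V) (x : String)
    (hx : g x = g' x) : pvLast l g x = pvLast l g' x := by
  induction l generalizing g g' with
  | nil => exact hx
  | cons p l ih =>
    simp only [pvLast, List.foldl_cons] at *
    exact ih _ _ (by simp only [pvUpd]; split <;> simp [hx])

theorem pvLast_not_mem {V : Type} (l : List (String × V)) (g : String → V) (x : String)
    (hx : x ∉ l.map Prod.fst) : pvLast l g x = g x := by
  induction l generalizing g with
  | nil => rfl
  | cons p l ih =>
    simp only [List.map_cons, List.mem_cons, not_or] at hx
    simp only [pvLast, List.foldl_cons]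
    rw [show (List.foldl (fun g p => pvUpd g p.1 p.2) (pvUpd g p.1 p.2) l) x
          = pvLast l (pvUpd g p.1 p.2) x from rfl, ih _ hx.2]
    simp [pvUpd, hx.1]

theorem pvLast_eq_get? {V : Type} (l : List (String × V)) (g : String → V) (x : String)
    (h : (l.map Prod.fst).Nodup) :
    pvLast l g x = ((PySem.Dict.mk l).get? x).getD (g x) := by
  induction l generalizing g with
  | nil => simp [pvLast, PySem.Dict.get?]
  | cons p l ih =>
    simp only [List.map_cons, List.nodup_cons] at h
    simp only [pvLast, List.foldl_cons]
    rw [show (List.foldl (fun g p => pvUpd g p.1 p.2) (pvUpd g p.1 p.2) l) x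
          = pvLast l (pvUpd g p.1 p.2) x from rfl]
    rw [PySem.Dict.get?_mk_cons]
    by_cases hx : x = p.1
    · subst hx
      rw [pvLast_not_mem _ _ _ h.1]
      simp [pvUpd]
    · rw [ih _ h.2]
      have : (pvUpd g p.1 p.2) x = g x := by simp [pvUpd, hx]
      simp [this, beq_iff_eq, Ne.symm hx]

-- A's update loop, run on a dict that is a table over pvDays, stays a table over pvDays
theorem foldA_items (l : List (String × List (String × Int)))
    (g : String → List (String × Int)) :
    (l.foldl (fun d p => if d.contains p.1 then d.insert p.1 p.2 else d)
      (PySem.Dict.mk (pvDays.map (fun x => (x, g x))))).items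
      = pvDays.map (fun x => (x, pvLast l g x)) := by
  induction l generalizing g with
  | nil => simp [pvLast]
  | cons p l ih =>
    simp only [List.foldl_cons]
    have hkeys : (PySem.Dict.mk (pvDays.map (fun x => (x, g x)))).keys = pvDays := by
      simp [PySem.Dict.keys_mk, List.map_map, Function.comp_def]
    by_cases hmem : p.1 ∈ pvDays
    · have hc : (PySem.Dict.mk (pvDays.map (fun x => (x, g x)))).contains p.1 = true := by
        rw [PySem.Dict.contains_eq_decide_mem_keys, hkeys]; simp [hmem]
      have hins : (PySem.Dict.mk (pvDays.map (fun x => (x, g x)))).insert p.1 p.2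
          = PySem.Dict.mk (pvDays.map (fun x => (x, pvUpd g p.1 p.2 x))) := by
        apply PySem.Dict.ext
        simp only [PySem.Dict.items_insert, hc, if_true]
        show (pvDays.map (fun x => (x, g x))).map _ = _
        rw [List.map_map]
        apply List.map_congr_left
        intro x _
        simp only [Function.comp, pvUpd, beq_iff_eq]
        split
        · next hxe => subst hxe; rfl
        · rfl
      rw [hc, if_pos rfl, hins, ih]
      apply List.map_congr_left
      intro x _
      simp only [pvLast, List.foldl_cons]
    · have hc : (PySem.Dict.mk (pvDays.map (fun x => (x, g x)))).contains p.1 = false := by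
        rw [PySem.Dict.contains_eq_decide_mem_keys, hkeys]; simp [hmem]
      rw [hc]
      simp only [Bool.false_eq_true, if_false]
      rw [ih]
      apply List.map_congr_left
      intro x hx
      have hne : x ≠ p.1 := fun h => hmem (h ▸ hx)
      simp only [pvLast, List.foldl_cons]
      refine congrArg (fun w => (x, w)) ?_
      exact (pvLast_congr l _ g x (by simp [pvUpd, hne])).symm

theorem init_eq :
    (PySem.Dict.ofList [("Monday", pvZero), ("Tuesday", pvZero), ("Wednesday", pvZero),
      ("Thursday", pvZero), ("Friday", pvZero), ("Saturday", pvZero), ("Sunday", pvZero)]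
      : PySem.Dict String (List (String × Int)))
    = PySem.Dict.mk (pvDays.map (fun x => (x, (fun _ => pvZero) x))) := by
  decide

-- ===== VERDICT (by name: the statement is the Claim_ definition above) =====
theorem generate_day_breakdown_spec : Claim_equal_generate_day_breakdown := by
  intro l _ hpre
  show generate_day_breakdown l = generate_day_breakdown_alt l
  unfold generate_day_breakdown generate_day_breakdown_alt
  rw [init_eq, foldA_items]
  apply List.map_congr_left
  intro x _
  rw [pvLast_eq_get? l _ x hpre]
  cases (PySem.Dict.mk l).get? x <;> rfl
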